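-- pv_equiv track=rewrite | github.com/lisihao/FlashMLX | mlx_lm/kvtc_metrics_benchmark.py | _normalize_lengths
-- ===== SOURCE A (Python) =====
-- def _normalize_lengths(lengths, total_tokens):
--     unique_lengths = []
--     seen = set()
--     for length in lengths:
--         if length in seen:
--             continue
--         if length <= 0:
--             raise ValueError("Prompt lengths must be positive integers")
--         seen.add(length)
--         if length > total_tokens:
--             continue
--         unique_lengths.append(length)
--     if not unique_lengths:
--         raise ValueError(
--             f"No requested lengths fit into the available prompt tokens ({total_tokens})"
--         )
--     return unique_lengths
-- ===== SOURCE B (Python) =====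
-- def _normalize_lengths(lengths, total_tokens):
--     lengths = list(lengths)
--     if any(l <= 0 for l in lengths):
--         raise ValueError("Prompt lengths must be positive integers")
--
--     def nub(ls):
--         # keep the head, recurse on the tail with all copies of the head removed
--         if not ls:
--             return []
--         head = ls[0]
--         return [head] + nub([x for x in ls[1:] if x != head])
--
--     fitting = [l for l in nub(lengths) if l <= total_tokens]
--     if not fitting:
--         raise ValueError(
--             f"No requested lengths fit into the available prompt tokens ({total_tokens})"
--         )
--     return fitting
-- ===== Notes on version B (the rewrite author's own statement) =====
-- stated objective: alternative
-- what changed: A's single fused loop maintaining a seen-set and an accumulator is replaced by a recursive tail-filtering nub (keep the head, recurse on the tail with the head's copies removed) with no auxiliary set at all, preceded by an up-front positivity check and followed by a cap filter.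
import Mathlib
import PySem

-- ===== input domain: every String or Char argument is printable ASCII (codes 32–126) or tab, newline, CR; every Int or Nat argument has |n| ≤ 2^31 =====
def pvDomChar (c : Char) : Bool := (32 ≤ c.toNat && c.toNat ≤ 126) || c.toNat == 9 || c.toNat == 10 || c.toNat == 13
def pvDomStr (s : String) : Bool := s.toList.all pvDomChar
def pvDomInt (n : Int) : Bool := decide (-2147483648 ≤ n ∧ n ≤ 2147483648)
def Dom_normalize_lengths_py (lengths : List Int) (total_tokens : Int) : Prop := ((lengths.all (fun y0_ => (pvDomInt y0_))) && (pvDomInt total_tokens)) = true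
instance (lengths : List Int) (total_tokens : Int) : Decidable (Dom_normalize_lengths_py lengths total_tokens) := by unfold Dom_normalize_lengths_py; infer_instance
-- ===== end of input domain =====

-- B replaces A's fused seen-set loop by a recursive tail-filtering nub (no auxiliary set), an up-front positivity check and a cap filter; same result, different algorithm. Return-value equivalence only.
-- ===== PORT A =====
-- A's loop: state (unique_lengths, seen); the loop body is the named step below; 'raise' branches are excluded by Pre_ (state left unchanged there).
def stepA (total_tokens : Int) (st : List Int × PySem.Set Int) (length : Int) : List Int × PySem.Set Int :=
  if PySem.Set.contains st.2 length then st                 -- continue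
  else if length ≤ 0 then st                                -- raise ValueError (outside Pre_)
  else
    let seen := PySem.Set.add st.2 length
    if length > total_tokens then (st.1, seen)              -- continue
    else (st.1 ++ [length], seen)

def normalize_lengths_py (lengths : List Int) (total_tokens : Int) : List Int :=
  (lengths.foldl (stepA total_tokens) ([], PySem.Set.empty)).1   -- empty result ⇒ raise ValueError (outside Pre_)

-- ===== PORT B =====
-- Source B's nub: keep the head, recurse on the tail with all copies of the head removed.
def nubB : List Int → List Int
  | [] => []
  | x :: xs => x :: nubB (xs.filter (fun y => y != x))
termination_by ls => ls.length
decreasing_by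
  simp
  exact List.length_filter_le _ _

def normalize_lengths_py_alt (lengths : List Int) (total_tokens : Int) : List Int :=
  if lengths.any (fun l => l ≤ 0) then []                   -- raise ValueError (outside Pre_)
  else (nubB lengths).filter (fun l => l ≤ total_tokens)    -- = [] ⇒ raise ValueError (outside Pre_)

-- ===== PRECONDITION & SPEC =====
-- Pre_ excludes exactly the inputs where A raises ValueError: a nonpositive length, or no length fitting total_tokens.
def Pre_normalize_lengths_py (lengths : List Int) (total_tokens : Int) : Prop :=
  (∀ l ∈ lengths, 0 < l) ∧ (∃ l ∈ lengths, l ≤ total_tokens)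
instance (lengths : List Int) (total_tokens : Int) : Decidable (Pre_normalize_lengths_py lengths total_tokens) := by unfold Pre_normalize_lengths_py; infer_instance
def pvWitness_normalize_lengths_py : List Int × Int := ([3, 1, 3, 7], 5)

def Spec_normalize_lengths_py (lengths : List Int) (total_tokens : Int) (out : List Int) : Prop := out = normalize_lengths_py_alt lengths total_tokens
instance (lengths : List Int) (total_tokens : Int) (out : List Int) : Decidable (Spec_normalize_lengths_py lengths total_tokens out) := by unfold Spec_normalize_lengths_py; infer_instance

-- ===== CLAIM (what is proved, stated in full; the proofs are below) =====
def Claim_equal_normalize_lengths_py : Prop := ∀ (lengths : List Int) (total_tokens : Int), Dom_normalize_lengths_py lengths total_tokens → Pre_normalize_lengths_py lengths total_tokens → Spec_normalize_lengths_py lengths total_tokens (normalize_lengths_py lengths total_tokens)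

-- ===== LEMMAS AND PROOFS =====

-- A's loop body, as a recursion on the remaining input, keeping only the accumulator's suffix.
def gA (total_tokens : Int) (s : PySem.Set Int) : List Int → List Int
  | [] => []
  | l :: ls =>
    if l ∈ s then gA total_tokens s ls
    else (if l > total_tokens then [] else [l]) ++ gA total_tokens (PySem.Set.add s l) ls

theorem stepA_of_mem {total_tokens l : Int} {acc : List Int} {s : PySem.Set Int} (hc : l ∈ s) :
    stepA total_tokens (acc, s) l = (acc, s) := by
  unfold stepA
  simp [hc]

theorem stepA_of_not_mem {total_tokens l : Int} {acc : List Int} {s : PySem.Set Int}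
    (hc : l ∉ s) (hl : 0 < l) :
    stepA total_tokens (acc, s) l =
      if l > total_tokens then (acc, PySem.Set.add s l) else (acc ++ [l], PySem.Set.add s l) := by
  unfold stepA
  simp [hc, not_le.mpr hl]

theorem foldl_eq_gA (total_tokens : Int) (xs : List Int) (hpos : ∀ l ∈ xs, 0 < l) :
    ∀ (acc : List Int) (s : PySem.Set Int),
    (xs.foldl (stepA total_tokens) (acc, s)).1 = acc ++ gA total_tokens s xs := by
  induction xs with
  | nil => intro acc s; simp [gA]
  | cons l ls ih =>
    intro acc s
    have hl : 0 < l := hpos l (by simp)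
    have hpos' : ∀ x ∈ ls, 0 < x := fun x hx => hpos x (by simp [hx])
    rw [List.foldl_cons]
    by_cases hc : l ∈ s
    · rw [stepA_of_mem hc, ih hpos']
      simp [gA, hc]
    · rw [stepA_of_not_mem hc hl]
      by_cases hf : l > total_tokens
      · rw [if_pos hf, ih hpos']
        simp [gA, hc, hf]
      · rw [if_neg hf, ih hpos']
        simp [gA, hc, hf]

theorem prefix_foldl_add (s : PySem.Set Int) (xs : List Int) :
    s <+: xs.foldl PySem.Set.add s := by
  induction xs generalizing s with
  | nil => simp
  | cons l ls ih =>
    refine List.IsPrefix.trans ?_ (ih (PySem.Set.add s l))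
    simp only [PySem.Set.add]
    split <;> simp

theorem gA_eq_drop_filter (total_tokens : Int) (xs : List Int) :
    ∀ s : PySem.Set Int,
    gA total_tokens s xs
      = ((xs.foldl PySem.Set.add s).drop s.length).filter (fun l => l ≤ total_tokens) := by
  induction xs with
  | nil => intro s; simp [gA]
  | cons l ls ih =>
    intro s
    simp only [gA, List.foldl_cons]
    by_cases hc : l ∈ s
    · simp [hc, ih]
    · have hadd : PySem.Set.add s l = s ++ [l] := PySem.Set.add_of_not_mem hc
      obtain ⟨t, ht⟩ := prefix_foldl_add (s ++ [l]) ls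
      simp only [hc, if_false, hadd, ih]
      rw [← ht]
      have hdrop : ((s ++ [l]) ++ t).drop s.length = l :: t := by
        rw [List.append_assoc]
        simp
      have hdrop' : ((s ++ [l]) ++ t).drop (s ++ [l]).length = t := by
        simp
      rw [hdrop, hdrop', List.filter_cons]
      by_cases hf : l > total_tokens
      · simp [hf, not_le.mpr hf]
      · simp [hf, not_lt.mp hf]

-- set(xs with x removed) = set(xs) with x removed
theorem ofList_filter_ne (x : Int) (xs : List Int) :
    PySem.Set.ofList (xs.filter (fun y => y != x))
      = PySem.Set.discard (PySem.Set.ofList xs) x := by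
  induction xs with
  | nil => simp [PySem.Set.ofList_nil, PySem.Set.discard]
  | cons z rest ih =>
    rw [List.filter_cons]
    by_cases hz : z = x
    · subst hz
      simp only [bne_self_eq_false, Bool.false_eq_true, if_false, ih,
        PySem.Set.ofList_cons, PySem.Set.discard, List.filter_cons]
      simp [List.filter_filter]
    · have hb : (z != x) = true := by simp [hz]
      rw [if_pos hb, PySem.Set.ofList_cons, PySem.Set.ofList_cons, ih]
      simp only [PySem.Set.discard, List.filter_cons]
      have hb2 : (!(z == x)) = true := by simp [hz]
      simp only [hb2, if_pos]
      simp [List.filter_filter, Bool.and_comm]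

-- B's recursive nub computes the ordered first-occurrence dedup (= set(xs) kept in order).
theorem nubB_eq_ofList_aux : ∀ (n : Nat) (xs : List Int), xs.length ≤ n → nubB xs = PySem.Set.ofList xs := by
  intro n
  induction n with
  | zero =>
    intro xs h
    rw [List.length_eq_zero_iff.mp (Nat.le_zero.mp h), nubB.eq_1]
    simp [PySem.Set.ofList_nil]
  | succ n ih =>
    intro xs h
    cases xs with
    | nil => rw [nubB.eq_1]; simp [PySem.Set.ofList_nil]
    | cons x rest =>
      have hlen : (rest.filter (fun y => y != x)).length ≤ n :=
        le_trans (List.length_filter_le _ _) (Nat.lt_succ_iff.mp (by simpa using h))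
      rw [nubB.eq_2, ih _ hlen, ofList_filter_ne, PySem.Set.ofList_cons]

theorem nubB_eq_ofList (xs : List Int) : nubB xs = PySem.Set.ofList xs :=
  nubB_eq_ofList_aux xs.length xs le_rfl

-- ===== VERDICT (by name: the statement is the Claim_ definition above) =====
theorem normalize_lengths_py_spec : Claim_equal_normalize_lengths_py := by
  intro lengths total_tokens _ hpre
  obtain ⟨hpos, hfit⟩ := hpre
  unfold Spec_normalize_lengths_py normalize_lengths_py normalize_lengths_py_alt
  have hany : lengths.any (fun l => l ≤ 0) = false := by
    simp only [List.any_eq_false, decide_eq_true_eq]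
    intro l hl
    exact not_le.mpr (hpos l hl)
  simp only [hany, Bool.false_eq_true, if_false]
  rw [foldl_eq_gA total_tokens lengths hpos [] PySem.Set.empty,
      gA_eq_drop_filter, nubB_eq_ofList]
  simp [PySem.Set.empty, PySem.Set.ofList_eq_foldl]
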